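-- pv_equiv track=rewrite | github.com/simuzin/Online_Judge | 프로그래머스/1/250121. ［PCCE 기출문제］ 10번 ／ 데이터 분석/［PCCE 기출문제］ 10번 ／ 데이터 분석.py | solution
-- ===== SOURCE A (Python) =====
-- def solution(data, ext, val_ext, sort_by):
--     key = {"code":0, "date":1, "maximum":2, "remain":3}
--     temp = sorted(data, key = lambda x:x[key[ext]])
--     for i in range(len(data)):
--         if temp[len(data) - i - 1][key[ext]] >= val_ext:
--             temp.pop(len(data) - i - 1)
--         else:
--             break
--     temp = sorted(temp, key = lambda x:x[key[sort_by]])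
--     return temp
-- ===== SOURCE B (Python) =====
-- def solution(data, ext, val_ext, sort_by):
--     key = {"code": 0, "date": 1, "maximum": 2, "remain": 3}
--     kept = [row for row in data if row[key[ext]] < val_ext]
--     return sorted(kept, key=lambda row: (row[key[sort_by]], row[key[ext]]))
-- ===== Notes on version B (the rewrite author's own statement) =====
-- stated objective: simpler
-- what changed: A's ascending sort followed by a pop-from-the-tail loop and a second stable sort is replaced by a single filter comprehension plus one sort on the composite key (sort_by column, ext column), whose secondary component reproduces the tie-break A got from its first stable sort.
import Mathlib
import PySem

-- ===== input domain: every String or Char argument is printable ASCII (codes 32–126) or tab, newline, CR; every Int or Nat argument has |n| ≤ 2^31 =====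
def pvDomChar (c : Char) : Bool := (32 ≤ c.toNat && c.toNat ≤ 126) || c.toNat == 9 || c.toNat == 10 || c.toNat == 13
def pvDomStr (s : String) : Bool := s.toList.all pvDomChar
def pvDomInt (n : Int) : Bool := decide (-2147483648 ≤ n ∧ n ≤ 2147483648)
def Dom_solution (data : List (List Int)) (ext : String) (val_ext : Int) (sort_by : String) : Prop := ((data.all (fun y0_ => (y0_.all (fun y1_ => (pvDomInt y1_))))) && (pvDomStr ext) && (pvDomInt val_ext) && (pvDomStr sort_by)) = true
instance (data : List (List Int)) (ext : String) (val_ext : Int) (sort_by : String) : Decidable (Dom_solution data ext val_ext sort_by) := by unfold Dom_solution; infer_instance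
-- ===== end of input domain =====

-- B replaces A's ascending sort + pop-from-the-tail loop + second stable sort by a single
-- filter plus one sort on the composite key (sort_by column, ext column); objective: simpler.

-- ===== PORT A =====
-- x[key[...]] : Python list indexing by the dict value (in-range under Pre_; getD 0 is never
-- reached inside Pre_, where the lookup is `some`)
def pvCol (k : Int) (row : List Int) : Int := (PySem.List.pyGet? row k).getD 0

-- key = {"code":0, "date":1, "maximum":2, "remain":3}
def pvKeyDict : PySem.Dict String Int :=
  PySem.Dict.ofList [("code", 0), ("date", 1), ("maximum", 2), ("remain", 3)]

-- for i in range(len(data)): if temp[len(data)-i-1][key[ext]] >= val_ext: temp.pop(len(data)-i-1) else: break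
def pvLoopA (kext v : Int) (n : Nat) (i : Nat) (temp : List (List Int)) : List (List Int) :=
  if _h : i < n then
    match PySem.List.pyGet? temp ((n : Int) - (i : Int) - 1) with
    | none => temp            -- IndexError (unreachable: the index is always in range)
    | some row =>
      if v ≤ pvCol kext row then
        match PySem.List.pop? temp ((n : Int) - (i : Int) - 1) with
        | none => temp        -- unreachable
        | some (_, rest) => pvLoopA kext v n (i + 1) rest
      else temp               -- break
  else temp
termination_by n - i

def solution (data : List (List Int)) (ext : String) (val_ext : Int) (sort_by : String) : List (List Int) :=
  let kext : Int := (PySem.Dict.get? pvKeyDict ext).getD 0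
  let temp := PySem.List.sorted data (pvCol kext)
  let temp2 := pvLoopA kext val_ext data.length 0 temp
  let ksort : Int := (PySem.Dict.get? pvKeyDict sort_by).getD 0
  PySem.List.sorted temp2 (pvCol ksort)

-- ===== PORT B =====
def solution_alt (data : List (List Int)) (ext : String) (val_ext : Int) (sort_by : String) : List (List Int) :=
  let kext : Int := (PySem.Dict.get? pvKeyDict ext).getD 0
  let ksort : Int := (PySem.Dict.get? pvKeyDict sort_by).getD 0
  let kept := data.filter (fun row => decide (pvCol kext row < val_ext))
  PySem.List.sorted2 kept (pvCol ksort) (pvCol kext)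

-- ===== PRECONDITION & SPEC =====
def pvKeyIdx (s : String) : Int :=
  if s = "code" then 0 else if s = "date" then 1 else if s = "maximum" then 2 else 3

-- Pre_ excludes exactly the inputs where Python A raises: with at least one row, a KeyError when
-- ext is not one of the four column names or an IndexError when some row is too short for the ext
-- column; and, when at least one row survives the filter, a KeyError when sort_by is not a column
-- name or an IndexError when a surviving row is too short for the sort_by column.  (On empty data,
-- and when no row survives, the key lambdas never run, so A returns even with bad names.)
def Pre_solution (data : List (List Int)) (ext : String) (val_ext : Int) (sort_by : String) : Prop :=
  data = [] ∨
  ((ext = "code" ∨ ext = "date" ∨ ext = "maximum" ∨ ext = "remain") ∧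
   (∀ row ∈ data, pvKeyIdx ext < (row.length : Int)) ∧
   (((sort_by = "code" ∨ sort_by = "date" ∨ sort_by = "maximum" ∨ sort_by = "remain") ∧
      ∀ row ∈ data, pvCol (pvKeyIdx ext) row < val_ext → pvKeyIdx sort_by < (row.length : Int)) ∨
    ∀ row ∈ data, ¬ pvCol (pvKeyIdx ext) row < val_ext))
instance (data : List (List Int)) (ext : String) (val_ext : Int) (sort_by : String) : Decidable (Pre_solution data ext val_ext sort_by) := by unfold Pre_solution; infer_instance

def pvWitness_solution : List (List Int) × String × Int × String :=
  ([[1, 20, 3, 4], [2, 10, 5, 6]], "code", 5, "date")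

def Spec_solution (data : List (List Int)) (ext : String) (val_ext : Int) (sort_by : String) (out : List (List Int)) : Prop := out = solution_alt data ext val_ext sort_by
instance (data : List (List Int)) (ext : String) (val_ext : Int) (sort_by : String) (out : List (List Int)) : Decidable (Spec_solution data ext val_ext sort_by out) := by unfold Spec_solution; infer_instance

-- ===== CLAIM (what is proved, stated in full; the proofs are below) =====
def Claim_equal_solution : Prop := ∀ (data : List (List Int)) (ext : String) (val_ext : Int) (sort_by : String), Dom_solution data ext val_ext sort_by → Pre_solution data ext val_ext sort_by → Spec_solution data ext val_ext sort_by (solution data ext val_ext sort_by)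

-- ===== LEMMAS AND PROOFS =====

-- unfolding equations for PySem.List.insertBy
theorem pv_insertBy_nil {α : Type} (b : α → α → Bool) (x : α) :
    PySem.List.insertBy b x [] = [x] := rfl

theorem pv_insertBy_cons {α : Type} (b : α → α → Bool) (x y : α) (ys : List α) :
    PySem.List.insertBy b x (y :: ys) =
      if b x y then x :: y :: ys else y :: PySem.List.insertBy b x ys := rfl

theorem pv_insertBy_all_true {α : Type} (b : α → α → Bool) (x : α) (l : List α)
    (h : ∀ y ∈ l, b x y = true) : PySem.List.insertBy b x l = x :: l := by
  induction l with
  | nil => rfl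
  | cons y ys _ih => rw [pv_insertBy_cons, if_pos (h y (List.mem_cons_self))]

theorem pv_insertBy_all_false {α : Type} (b : α → α → Bool) (x : α) (l : List α)
    (h : ∀ y ∈ l, b x y = false) : PySem.List.insertBy b x l = l ++ [x] := by
  induction l with
  | nil => rfl
  | cons y ys ih =>
      rw [pv_insertBy_cons, if_neg (by simp [h y List.mem_cons_self]),
        ih (fun z hz => h z (List.mem_cons_of_mem _ hz))]
      rfl

theorem pv_insertBy_append_last {α : Type} (b : α → α → Bool) (x z : α) (l : List α)
    (h : b x z = true) :
    PySem.List.insertBy b x (l ++ [z]) = PySem.List.insertBy b x l ++ [z] := by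
  induction l with
  | nil => simp [pv_insertBy_nil, pv_insertBy_cons, h]
  | cons y ys ih =>
      rw [List.cons_append, pv_insertBy_cons, pv_insertBy_cons]
      by_cases hxy : b x y
      · simp [hxy]
      · simp [hxy, ih]

theorem pv_insertBy_congr {α : Type} (b b' : α → α → Bool) (x : α) (l : List α)
    (h : ∀ y ∈ l, b x y = b' x y) :
    PySem.List.insertBy b x l = PySem.List.insertBy b' x l := by
  induction l with
  | nil => rfl
  | cons y ys ih =>
      rw [pv_insertBy_cons, pv_insertBy_cons, h y List.mem_cons_self,
        ih (fun z hz => h z (List.mem_cons_of_mem _ hz))]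

theorem pv_filter_insertBy_neg {α : Type} (p : α → Bool) (b : α → α → Bool) (x : α)
    (l : List α) (hx : p x = false) :
    (PySem.List.insertBy b x l).filter p = l.filter p := by
  induction l with
  | nil => simp [pv_insertBy_nil, hx]
  | cons y ys ih =>
      rw [pv_insertBy_cons]
      by_cases hxy : b x y
      · simp [hxy, hx]
      · simp only [if_neg hxy, List.filter_cons, ih]

theorem pv_filter_insertBy_pos {α : Type} (p : α → Bool) (e : α → Int) (x : α)
    (l : List α) (hx : p x = true) (hl : l.Pairwise (fun a b => e a ≤ e b)) :
    (PySem.List.insertBy (fun a b => decide (e a < e b)) x l).filter p =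
      PySem.List.insertBy (fun a b => decide (e a < e b)) x (l.filter p) := by
  induction l with
  | nil => simp [pv_insertBy_nil, hx]
  | cons y ys ih =>
      rcases List.pairwise_cons.mp hl with ⟨hy, hys⟩
      rw [pv_insertBy_cons]
      by_cases hxy : e x < e y
      · simp only [decide_eq_true_eq, if_pos hxy, List.filter_cons, hx]
        by_cases hpy : p y
        · simp [hpy, pv_insertBy_cons, hxy]
        · simp only [hpy, Bool.false_eq_true, if_false, if_true]
          rw [pv_insertBy_all_true]
          intro w hw
          have hwys := List.mem_of_mem_filter hw
          simp only [decide_eq_true_eq]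
          exact lt_of_lt_of_le hxy (hy w hwys)
      · simp only [decide_eq_true_eq, if_neg hxy, List.filter_cons]
        by_cases hpy : p y
        · simp only [hpy, if_true, pv_insertBy_cons, decide_eq_true_eq, if_neg hxy]
          rw [ih hys]
        · simp only [hpy, Bool.false_eq_true, if_false]
          exact ih hys

-- commuting two insertions: x by the lexicographic key, z by the primary key, with e x < e z
theorem pv_insert_comm {α : Type} (s e : α → Int) (x z : α) (hxz : e x < e z) (S : List α) :
    PySem.List.insertBy (fun a b => decide (s a < s b)) z
        (PySem.List.insertBy (fun a b => decide (s a < s b) || (!decide (s b < s a) && decide (e a < e b))) x S) =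
      PySem.List.insertBy (fun a b => decide (s a < s b) || (!decide (s b < s a) && decide (e a < e b))) x
        (PySem.List.insertBy (fun a b => decide (s a < s b)) z S) := by
  induction S with
  | nil =>
      simp only [pv_insertBy_nil, pv_insertBy_cons]
      by_cases h : s z < s x
      · have h1 : ¬ s x < s z := by omega
        simp [h, h1]
      · have h1 : (decide (s x < s z) || (!decide (s z < s x) && decide (e x < e z))) = true := by
          simp only [h, decide_false, Bool.not_false, Bool.true_and, Bool.or_eq_true,
            decide_eq_true_eq]
          omega
        simp [h, h1, pv_insertBy_cons]
        all_goals exact fun h2 h3 => absurd hxz (by omega)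
  | cons y S' ih =>
      by_cases hxy : (decide (s x < s y) || (!decide (s y < s x) && decide (e x < e y))) = true
      · by_cases hzy : s z < s y
        · -- both inserted before y
          by_cases hzx : s z < s x
          · have hnb : ¬ (s x < s z ∨ (¬ s z < s x ∧ e x < e z)) := by omega
            simp [pv_insertBy_cons, hxy, hzy, hzx, hnb, decide_eq_true_eq]
            all_goals exact fun h2 => absurd h2 (by omega)
          · have hb : (decide (s x < s z) || (!decide (s z < s x) && decide (e x < e z))) = true := by
              simp only [Bool.or_eq_true, Bool.and_eq_true, Bool.not_eq_true', decide_eq_true_eq,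
                decide_eq_false_iff_not]
              by_cases h2 : s x < s z
              · exact Or.inl h2
              · exact Or.inr ⟨hzx, hxz⟩
            simp [pv_insertBy_cons, hxy, hzy, hzx, hb]
            all_goals exact fun h2 h3 => absurd hxz (by omega)
        · -- x before y, z after y
          have hxy' : s x ≤ s y := by
            have hxy2 := hxy
            simp only [Bool.or_eq_true, Bool.and_eq_true, Bool.not_eq_true',
              decide_eq_true_eq, decide_eq_false_iff_not] at hxy2
            omega
          have hzx : ¬ s z < s x := by omega
          simp [pv_insertBy_cons, hxy, hzy, hzx]
      · by_cases hzy : s z < s y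
        · -- z before y, x after y
          have hyx : s y ≤ s x := by
            simp only [Bool.or_eq_true, Bool.and_eq_true, Bool.not_eq_true',
              decide_eq_true_eq, decide_eq_false_iff_not, not_or, not_and] at hxy
            omega
          have hb : ¬ (decide (s x < s z) || (!decide (s z < s x) && decide (e x < e z))) = true := by
            simp only [Bool.or_eq_true, Bool.and_eq_true, Bool.not_eq_true',
              decide_eq_true_eq, decide_eq_false_iff_not, not_or, not_and]
            constructor
            · omega
            · intro h; omega
          simp [pv_insertBy_cons, hxy, hzy, hb]
        · -- both after y
          simp [pv_insertBy_cons, hxy, hzy, ih]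

-- sorted (xs ++ [x]) key = insertBy x (sorted xs key)
theorem pv_sorted_append {α : Type} (xs : List α) (x : α) (key : α → Int) :
    PySem.List.sorted (xs ++ [x]) key =
      PySem.List.insertBy (fun a b => decide (key a < key b)) x (PySem.List.sorted xs key) := by
  rw [PySem.List.sorted_eq_foldl_insertBy, PySem.List.sorted_eq_foldl_insertBy, List.foldl_append]
  rfl

theorem pv_sorted2_append {α : Type} (xs : List α) (x : α) (s e : α → Int) :
    PySem.List.sorted2 (xs ++ [x]) s e =
      PySem.List.insertBy (fun a b => decide (s a < s b) || (!decide (s b < s a) && decide (e a < e b))) x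
        (PySem.List.sorted2 xs s e) := by
  show List.foldl _ [] (xs ++ [x]) = _
  rw [List.foldl_append]
  rfl

-- the key stability step: inserting x by e into an e-sorted l, then sorting by s,
-- is inserting x lexicographically into (sorted l s)
theorem pv_stable_step {α : Type} (s e : α → Int) (x : α) (l : List α)
    (hl : l.Pairwise (fun a b => e a ≤ e b)) :
    PySem.List.sorted (PySem.List.insertBy (fun a b => decide (e a < e b)) x l) s =
      PySem.List.insertBy (fun a b => decide (s a < s b) || (!decide (s b < s a) && decide (e a < e b))) x
        (PySem.List.sorted l s) := by
  induction l using List.reverseRecOn with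
  | nil =>
      simp only [pv_insertBy_nil, pv_insertBy_cons]
      rfl
  | append_singleton l' z ih =>
      rw [List.pairwise_append] at hl
      rcases hl with ⟨hl', _, hcross⟩
      have hcross' : ∀ y ∈ l', e y ≤ e z := fun y hy => hcross y hy z List.mem_cons_self
      by_cases hb : e x < e z
      · rw [pv_insertBy_append_last _ _ _ _ (decide_eq_true hb), pv_sorted_append,
          ih hl', pv_insert_comm s e x z hb, ← pv_sorted_append]
      · have hall : ∀ y ∈ l' ++ [z], (fun a b => decide (e a < e b)) x y = false := by
          intro y hy
          rcases List.mem_append.mp hy with h | h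
          · have := hcross' y h
            simp only [decide_eq_false_iff_not]
            omega
          · simp only [List.mem_singleton] at h
            subst h
            simpa using hb
        rw [pv_insertBy_all_false _ _ _ hall, pv_sorted_append (l' ++ [z]) x s]
        apply pv_insertBy_congr
        intro y hy
        have hy' : y ∈ l' ++ [z] := (PySem.List.mem_sorted _ _ _ _).mp hy
        have hey : ¬ e x < e y := by
          have := hall y hy'
          simpa using this
        simp [hey]

-- filter commutes with the stable sort
theorem pv_filter_sorted {α : Type} (p : α → Bool) (e : α → Int) (xs : List α) :
    (PySem.List.sorted xs e).filter p = PySem.List.sorted (xs.filter p) e := by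
  induction xs using List.reverseRecOn with
  | nil => rfl
  | append_singleton l x ih =>
      rw [pv_sorted_append, List.filter_append]
      by_cases hp : p x
      · rw [pv_filter_insertBy_pos p e x _ hp (PySem.List.sorted_pairwise _ _), ih]
        simp only [List.filter_cons, hp, if_true, List.filter_nil]
        rw [← pv_sorted_append]
      · rw [pv_filter_insertBy_neg p _ x _ (Bool.not_eq_true _ ▸ hp), ih]
        simp [List.filter_cons, hp]

-- composing the two stable sorts is the one lexicographic sort
theorem pv_sorted_sorted_eq_sorted2 {α : Type} (s e : α → Int) (xs : List α) :
    PySem.List.sorted (PySem.List.sorted xs e) s = PySem.List.sorted2 xs s e := by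
  induction xs using List.reverseRecOn with
  | nil => rfl
  | append_singleton l x ih =>
      rw [pv_sorted_append, pv_stable_step s e x _ (PySem.List.sorted_pairwise _ _), ih,
        pv_sorted2_append]

theorem pv_eraseIdx_concat {α : Type} (l : List α) (z : α) :
    (l ++ [z]).eraseIdx l.length = l := by
  induction l with
  | nil => rfl
  | cons y ys ih => simpa [List.eraseIdx] using ih

-- A's pop loop on an e-ascending list removes exactly the rows with column value ≥ v
theorem pv_loop_eq_filter (kext v : Int) (n : Nat) :
    ∀ (m i : Nat) (temp : List (List Int)),
      temp.Pairwise (fun a b => pvCol kext a ≤ pvCol kext b) →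
      temp.length = n - i → m = n - i →
      pvLoopA kext v n i temp = temp.filter (fun r => decide (pvCol kext r < v)) := by
  intro m
  induction m with
  | zero =>
      intro i temp _hp hlen hm
      have : temp = [] := List.eq_nil_of_length_eq_zero (by omega)
      subst this
      rw [pvLoopA]
      split
      · simp [PySem.List.pyGet?, PySem.List.pyIdx?]
      · rfl
  | succ m ih =>
      intro i temp hp hlen hm
      have hin : i < n := by omega
      rcases temp.eq_nil_or_concat' with rfl | ⟨ys, z, rfl⟩
      · simp at hlen; omega
      · have hylen : ys.length = m := by simp at hlen; omega
        have hidx : (n : Int) - (i : Int) - 1 = ((ys.length : Nat) : Int) := by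
          have : n - i = ys.length + 1 := by omega
          omega
        rw [List.pairwise_append] at hp
        rcases hp with ⟨hys, _, hcross⟩
        have hget : PySem.List.pyGet? (ys ++ [z]) ((n : Int) - (i : Int) - 1) = some z := by
          rw [hidx, PySem.List.pyGet?_natCast, List.getElem?_concat_length]
        rw [pvLoopA]
        simp only [dif_pos hin, hget]
        by_cases hvz : v ≤ pvCol kext z
        · rw [if_pos hvz, hidx,
            PySem.List.pop?_natCast _ _ (by simp)]
          simp only [List.getElem_concat_length, pv_eraseIdx_concat]
          rw [ih (i + 1) ys hys (by omega) (by omega)]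
          have hnz : (decide (pvCol kext z < v)) = false := by
            simp only [decide_eq_false_iff_not]; omega
          simp [List.filter_append, hnz]
        · rw [if_neg hvz]
          have : ∀ r ∈ ys ++ [z], decide (pvCol kext r < v) = true := by
            intro r hr
            rcases List.mem_append.mp hr with h | h
            · have := hcross r h z List.mem_cons_self
              simp only [decide_eq_true_eq]; omega
            · simp only [List.mem_singleton] at h
              subst h
              simp only [decide_eq_true_eq]; omega
          exact (List.filter_eq_self.mpr this).symm

-- the two ports agree for any column indices (unconditionally)
theorem pv_main (data : List (List Int)) (kext ksort v : Int) :
    PySem.List.sorted (pvLoopA kext v data.length 0 (PySem.List.sorted data (pvCol kext))) (pvCol ksort) =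
      PySem.List.sorted2 (data.filter (fun row => decide (pvCol kext row < v))) (pvCol ksort) (pvCol kext) := by
  rw [pv_loop_eq_filter kext v data.length data.length 0 _
      (PySem.List.sorted_pairwise _ _)
      (by simp [PySem.List.length_sorted]) (by simp),
    pv_filter_sorted, pv_sorted_sorted_eq_sorted2]

-- ===== VERDICT (by name: the statement is the Claim_ definition above) =====
theorem solution_spec : Claim_equal_solution := by
  intro data ext val_ext sort_by _hdom _hpre
  unfold Spec_solution
  simp only [solution, solution_alt]
  exact (pv_main data ((pvKeyDict.get? ext).getD 0) ((pvKeyDict.get? sort_by).getD 0) val_ext)
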